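-- pv_equiv track=rewrite | github.com/SFU-HiAccel/AutoNTT | automation_framework/code_generators/iterative/header_files/ntt_header_file.py | genMaskArrays
-- ===== SOURCE A (Python) =====
-- def genMaskArrays(logN):
--     fwd_mask_arr = []
--     for i in range(logN):
--         mask = (1<<i)-1
--         fwd_mask_arr.append(mask)
--
--     inv_mask_arr = []
--     mask = 0
--     for i in range(logN):
--         mask += (1<<(logN-i-1))
--         inv_mask_arr.append(mask)
--
--     return fwd_mask_arr, inv_mask_arr
-- ===== SOURCE B (Python) =====
-- def genMaskArrays(logN):
--     fwd_mask_arr = [(1 << i) - 1 for i in range(logN)]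
--     inv_mask_arr = [(1 << logN) - (1 << (logN - i - 1)) for i in range(logN)]
--     return fwd_mask_arr, inv_mask_arr
-- ===== Notes on version B (the rewrite author's own statement) =====
-- stated objective: simpler
-- what changed: The inverse-mask array is computed by the per-index closed form 2^logN - 2^(logN-i-1) instead of threading a running accumulator mask, and both arrays become stateless comprehensions.
import Mathlib
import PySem

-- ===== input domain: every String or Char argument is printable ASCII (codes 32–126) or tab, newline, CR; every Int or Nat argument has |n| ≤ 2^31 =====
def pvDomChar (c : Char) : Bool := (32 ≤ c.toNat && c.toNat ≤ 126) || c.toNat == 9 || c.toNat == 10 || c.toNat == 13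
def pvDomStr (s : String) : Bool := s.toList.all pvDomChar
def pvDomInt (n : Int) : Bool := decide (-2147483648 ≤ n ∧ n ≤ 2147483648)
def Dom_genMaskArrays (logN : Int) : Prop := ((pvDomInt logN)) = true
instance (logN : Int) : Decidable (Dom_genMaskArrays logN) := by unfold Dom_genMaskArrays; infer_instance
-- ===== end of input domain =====

-- B replaces A's running-accumulator inverse-mask loop by the per-index closed form
-- 2^logN - 2^(logN-i-1) (objective: simpler, stateless).

-- ===== PORT A =====
-- '1 << k' is ported as '2 ^ k.toNat': every shift amount reached by the loops is
-- nonnegative (0 ≤ i < logN), so the port is exact there.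
def genMaskArrays (logN : Int) : List Int × List Int :=
  let fwd_mask_arr : List Int :=
    (PySem.List.pyRange 0 logN 1).foldl (fun acc i => acc ++ [(2:Int) ^ i.toNat - 1]) []
  let inv_st : Int × List Int :=
    (PySem.List.pyRange 0 logN 1).foldl
      (fun (p : Int × List Int) i =>
        let m := p.1 + (2:Int) ^ (logN - i - 1).toNat
        (m, p.2 ++ [m])) (0, [])
  (fwd_mask_arr, inv_st.2)

-- ===== PORT B =====
def genMaskArrays_alt (logN : Int) : List Int × List Int :=
  ((PySem.List.pyRange 0 logN 1).map (fun i => (2:Int) ^ i.toNat - 1),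
   (PySem.List.pyRange 0 logN 1).map (fun i => (2:Int) ^ logN.toNat - (2:Int) ^ (logN - i - 1).toNat))

-- ===== PRECONDITION & SPEC =====
def Spec_genMaskArrays (logN : Int) (out : List Int × List Int) : Prop := out = genMaskArrays_alt logN
instance (logN : Int) (out : List Int × List Int) : Decidable (Spec_genMaskArrays logN out) := by unfold Spec_genMaskArrays; infer_instance

-- ===== CLAIM (what is proved, stated in full; the proofs are below) =====
def Claim_equal_genMaskArrays : Prop := ∀ (logN : Int), Dom_genMaskArrays logN → Spec_genMaskArrays logN (genMaskArrays logN)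

-- ===== LEMMAS AND PROOFS =====

theorem foldl_app_eq_map (f : Int → Int) (l : List Int) (acc : List Int) :
    l.foldl (fun a x => a ++ [f x]) acc = acc ++ l.map f := by
  induction l generalizing acc with
  | nil => simp
  | cons x xs ih => simp [List.foldl_cons, ih]

theorem inv_foldl_closed (L : Int) (n : Nat) (hn : (n : Int) ≤ L) :
    ((List.range n).map (fun k => Int.ofNat k)).foldl
      (fun (p : Int × List Int) i =>
        ((p.1 + (2:Int) ^ (L - i - 1).toNat),
         p.2 ++ [p.1 + (2:Int) ^ (L - i - 1).toNat])) (0, [])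
    = ((2:Int) ^ L.toNat - (2:Int) ^ (L.toNat - n),
       ((List.range n).map (fun k => Int.ofNat k)).map
         (fun i => (2:Int) ^ L.toNat - (2:Int) ^ (L - i - 1).toNat)) := by
  induction n with
  | zero => simp
  | succ m ih =>
    have hm : (m : Int) ≤ L := by push_cast at hn ⊢; omega
    have hpow : (2:Int) ^ (L.toNat - m) = (2:Int) ^ (L.toNat - m - 1) * 2 := by
      rw [← pow_succ]; congr 1; omega
    have hexp : (L - (m : Int) - 1).toNat = L.toNat - m - 1 := by omega
    have h1 : L.toNat - (m + 1) = L.toNat - m - 1 := by omega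
    rw [List.range_succ, List.map_append, List.foldl_append, ih hm]
    simp only [List.map_cons, List.map_nil, List.foldl_cons, List.foldl_nil, List.map_append]
    refine Prod.ext ?_ ?_
    · simp only [Int.ofNat_eq_natCast]
      rw [hexp, h1, hpow]; ring
    · simp only []
      rw [List.append_cancel_left_eq]
      simp only [Int.ofNat_eq_natCast, List.cons.injEq, and_true]
      rw [hexp, hpow]; ring

theorem genMaskArrays_eq (logN : Int) : genMaskArrays logN = genMaskArrays_alt logN := by
  unfold genMaskArrays genMaskArrays_alt
  by_cases h : logN ≤ 0
  · simp [PySem.List.pyRange_one_eq_nil h]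
  · have hrange : PySem.List.pyRange 0 logN 1
        = (List.range logN.toNat).map (fun k => Int.ofNat k) := by
      rw [PySem.List.pyRange_one]
      simp [Int.ofNat_eq_natCast]
    refine Prod.ext ?_ ?_
    · simp only [hrange]
      rw [foldl_app_eq_map]
      simp
    · simp only [hrange]
      exact congrArg Prod.snd
        (inv_foldl_closed logN logN.toNat (by omega))

-- ===== VERDICT (by name: the statement is the Claim_ definition above) =====
theorem genMaskArrays_spec : Claim_equal_genMaskArrays := by
  intro logN _
  unfold Spec_genMaskArrays
  exact genMaskArrays_eq logN
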